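-- pv_equiv track=rewrite | github.com/kristijanbartol/Deep-Music-Tagger | src/input_data.py | _get_indices_mapping
-- ===== SOURCE A (Python) =====
-- def _get_indices_mapping(y_all):
--     indices = []
--     for genre_list in y_all:
--         for genre_id in genre_list:
--             if genre_id not in indices:
--                 indices.append(genre_id)
--     indices = sorted(indices)
--     indices_map = dict()
--     for i, index in enumerate(indices):
--         indices_map[index] = i
--     return indices_map
-- ===== SOURCE B (Python) =====
-- def _get_indices_mapping(y_all):
--     flat = []
--     for genre_list in y_all:
--         flat.extend(genre_list)
--     flat.sort()
--     indices_map = dict()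
--     counter = 0
--     prev = None
--     for value in flat:
--         if prev is None or value != prev:
--             indices_map[value] = counter
--             counter += 1
--             prev = value
--     return indices_map
-- ===== Notes on version B (the rewrite author's own statement) =====
-- stated objective: faster
-- what changed: B flattens all ids, sorts once with duplicates, and assigns contiguous ranks in a single scan that detects run starts, instead of A's linear-membership dedup loop followed by sort and enumerate.
import Mathlib
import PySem

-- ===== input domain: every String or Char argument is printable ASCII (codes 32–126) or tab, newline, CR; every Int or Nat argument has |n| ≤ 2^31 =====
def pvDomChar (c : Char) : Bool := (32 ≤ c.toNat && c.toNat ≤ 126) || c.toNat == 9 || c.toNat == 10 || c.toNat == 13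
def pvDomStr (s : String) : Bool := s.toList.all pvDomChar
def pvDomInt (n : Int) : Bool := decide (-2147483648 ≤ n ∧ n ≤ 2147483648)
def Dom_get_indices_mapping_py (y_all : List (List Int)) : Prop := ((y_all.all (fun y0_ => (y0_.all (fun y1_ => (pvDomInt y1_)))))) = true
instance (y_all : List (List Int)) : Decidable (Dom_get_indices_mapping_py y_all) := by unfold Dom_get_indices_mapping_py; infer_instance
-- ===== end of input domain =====

-- B flattens everything, sorts once (with duplicates) and assigns ranks in one scan that
-- detects run starts, instead of A's quadratic membership-dedup followed by sort+enumerate.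

-- ===== PORT A =====
def get_indices_mapping_py (y_all : List (List Int)) : List (Int × Int) :=
  let indices : List Int :=
    y_all.foldl (fun indices genre_list =>
      genre_list.foldl (fun indices genre_id =>
        if genre_id ∈ indices then indices else indices ++ [genre_id]) indices) []
  let indices := PySem.List.sorted indices (fun x => x) false
  let indices_map : PySem.Dict Int Int :=
    (PySem.List.enumerate indices 0).foldl (fun d p => d.insert p.2 p.1) PySem.Dict.empty
  indices_map.items

-- ===== PORT B =====
-- loop body of B's single scan: state = (indices_map, counter, prev)
def bStep (st : PySem.Dict Int Int × Int × Option Int) (value : Int) :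
    PySem.Dict Int Int × Int × Option Int :=
  if st.2.2 = none ∨ st.2.2 ≠ some value then
    (st.1.insert value st.2.1, st.2.1 + 1, some value)
  else st

def get_indices_mapping_py_alt (y_all : List (List Int)) : List (Int × Int) :=
  let flat : List Int := y_all.foldl (fun flat genre_list => flat ++ genre_list) []
  let flat := PySem.List.sorted flat (fun x => x) false
  let st := flat.foldl bStep (PySem.Dict.empty, 0, none)
  st.1.items

-- ===== PRECONDITION & SPEC =====
def Spec_get_indices_mapping_py (y_all : List (List Int)) (out : List (Int × Int)) : Prop := out = get_indices_mapping_py_alt y_all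
instance (y_all : List (List Int)) (out : List (Int × Int)) : Decidable (Spec_get_indices_mapping_py y_all out) := by unfold Spec_get_indices_mapping_py; infer_instance

-- ===== CLAIM (what is proved, stated in full; the proofs are below) =====
def Claim_equal_get_indices_mapping_py : Prop := ∀ (y_all : List (List Int)), Dom_get_indices_mapping_py y_all → Spec_get_indices_mapping_py y_all (get_indices_mapping_py y_all)

-- ===== LEMMAS AND PROOFS =====

-- A's membership-append step
def aIns (acc : List Int) (x : Int) : List Int := if x ∈ acc then acc else acc ++ [x]

-- adjacent dedup with a 'previous value' marker (proof-side model of B's scan)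
def dedupAdj : Option Int → List Int → List Int
  | _, [] => []
  | p, v :: F => if some v = p then dedupAdj p F else v :: dedupAdj (some v) F

lemma foldl_extend (l : List (List Int)) (acc : List Int) :
    l.foldl (fun flat genre_list => flat ++ genre_list) acc = acc ++ l.flatten := by
  induction l generalizing acc with
  | nil => simp
  | cons h t ih => simp [List.foldl_cons, ih, List.flatten_cons]

lemma a_dedup_eq (l : List (List Int)) (acc : List Int) :
    l.foldl (fun indices genre_list => genre_list.foldl aIns indices) acc
      = l.flatten.foldl aIns acc := by
  induction l generalizing acc with
  | nil => simp
  | cons h t ih => simp [List.foldl_cons, ih, List.flatten_cons, List.foldl_append]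

lemma mem_foldl_aIns (l : List Int) (acc : List Int) (x : Int) :
    x ∈ l.foldl aIns acc ↔ x ∈ acc ∨ x ∈ l := by
  induction l generalizing acc with
  | nil => simp
  | cons v t ih =>
      simp only [List.foldl_cons, ih, aIns]
      by_cases hv : v ∈ acc
      · simp [hv]; constructor
        · tauto
        · rintro (h | h | h) <;> try tauto
          subst h; tauto
      · simp [hv, List.mem_append]
        tauto

lemma nodup_foldl_aIns (l : List Int) (acc : List Int) (h : acc.Nodup) :
    (l.foldl aIns acc).Nodup := by
  induction l generalizing acc with
  | nil => simpa
  | cons v t ih =>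
      simp only [List.foldl_cons, aIns]
      by_cases hv : v ∈ acc
      · simpa [hv] using ih acc h
      · rw [if_neg hv]
        refine ih _ ?_
        rw [List.nodup_append]
        refine ⟨h, List.nodup_singleton v, ?_⟩
        intro a ha b hb
        simp only [List.mem_singleton] at hb
        exact fun h' => hv ((h'.trans hb) ▸ ha)

-- B's scan over a sorted list folds the insert over the adjacent-dedup values
lemma scan_eq (F : List Int) (d : PySem.Dict Int Int) (c : Int) (p : Option Int)
    (hs : F.Pairwise (· ≤ ·)) (hb : ∀ x ∈ F, ∀ q, p = some q → q ≤ x) :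
    (F.foldl bStep (d, c, p)).1
      = (PySem.List.enumerate (dedupAdj p F) c).foldl (fun d q => d.insert q.2 q.1) d := by
  induction F generalizing d c p with
  | nil => simp [dedupAdj, PySem.List.enumerate_nil]
  | cons v F ih =>
      rcases List.pairwise_cons.mp hs with ⟨hv, hs'⟩
      by_cases hp : some v = p
      · -- duplicate of prev: skipped
        have : bStep (d, c, p) v = (d, c, p) := by
          simp [bStep, ← hp]
        rw [List.foldl_cons, this, dedupAdj, if_pos hp]
        exact ih d c p hs' (fun x hx q hq => le_trans (hb v (by simp) q hq) (hv x hx))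
      · -- run start: insert and advance
        have hcond : p = none ∨ p ≠ some v := by
          cases p with
          | none => exact Or.inl rfl
          | some q => exact Or.inr (fun h => hp h.symm)
        have : bStep (d, c, p) v = (d.insert v c, c + 1, some v) := by
          simp only [bStep]
          rw [if_pos hcond]
        rw [List.foldl_cons, this, dedupAdj, if_neg hp, PySem.List.enumerate_cons,
          List.foldl_cons]
        exact ih _ _ _ hs' (fun x hx q hq => by
          rcases Option.some.inj hq.symm with rfl; exact hv x hx)

lemma dedupAdj_lt (F : List Int) (p : Option Int)
    (hs : F.Pairwise (· ≤ ·)) (hb : ∀ x ∈ F, ∀ q, p = some q → q ≤ x) :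
    (dedupAdj p F).Pairwise (· < ·) ∧ (∀ x ∈ dedupAdj p F, ∀ q, p = some q → q < x) := by
  induction F generalizing p with
  | nil => simp [dedupAdj]
  | cons v F ih =>
      rcases List.pairwise_cons.mp hs with ⟨hv, hs'⟩
      by_cases hp : some v = p
      · rw [dedupAdj, if_pos hp]
        exact ih p hs' (fun x hx q hq => le_trans (hb v (by simp) q hq) (hv x hx))
      · rw [dedupAdj, if_neg hp]
        obtain ⟨h1, h2⟩ := ih (some v) hs' (fun x hx q hq => by
          rcases Option.some.inj hq.symm with rfl; exact hv x hx)
        constructor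
        · exact List.pairwise_cons.mpr ⟨fun x hx => h2 x hx v rfl, h1⟩
        · intro x hx q hq
          have hqv : q ≤ v := hb v (by simp) q hq
          have hqv' : q < v := lt_of_le_of_ne hqv (fun h => hp (by rw [← h]; exact hq.symm))
          rcases List.mem_cons.mp hx with rfl | hx'
          · exact hqv'
          · exact lt_trans hqv' (h2 x hx' v rfl)

lemma mem_dedupAdj (F : List Int) (p : Option Int) (x : Int)
    (hs : F.Pairwise (· ≤ ·)) (hb : ∀ y ∈ F, ∀ q, p = some q → q ≤ y) :
    x ∈ dedupAdj p F ↔ x ∈ F ∧ ∀ q, p = some q → x ≠ q := by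
  induction F generalizing p with
  | nil => simp [dedupAdj]
  | cons v F ih =>
      rcases List.pairwise_cons.mp hs with ⟨hv, hs'⟩
      by_cases hp : some v = p
      · rw [dedupAdj, if_pos hp]
        rw [ih p hs' (fun y hy q hq => le_trans (hb v (by simp) q hq) (hv y hy))]
        subst hp
        constructor
        · rintro ⟨hxF, hne⟩
          exact ⟨List.mem_cons_of_mem _ hxF, hne⟩
        · rintro ⟨hxF, hne⟩
          have hxv : x ≠ v := hne v rfl
          rcases List.mem_cons.mp hxF with rfl | h
          · exact absurd rfl hxv
          · exact ⟨h, hne⟩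
      · rw [dedupAdj, if_neg hp]
        rw [List.mem_cons, ih (some v) hs' (fun y hy q hq => by
          rcases Option.some.inj hq.symm with rfl; exact hv y hy)]
        constructor
        · rintro (rfl | ⟨hxF, hne⟩)
          · refine ⟨by simp, fun q hq h => hp (by rw [h, hq])⟩
          · refine ⟨List.mem_cons_of_mem _ hxF, fun q hq => ?_⟩
            have hqv : q ≤ v := hb v (by simp) q hq
            have hqv' : q < v := lt_of_le_of_ne hqv (fun h => hp (by rw [← h]; exact hq.symm))
            have : v ≤ x := hv x hxF
            omega
        · rintro ⟨hxF, hne⟩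
          rcases List.mem_cons.mp hxF with rfl | h
          · exact Or.inl rfl
          · by_cases hxv : x = v
            · exact Or.inl hxv
            · exact Or.inr ⟨h, fun q hq => by rcases Option.some.inj hq.symm with rfl; exact hxv⟩

-- fold of fresh distinct keys into a dict, as a map (specialised from PySem)
lemma items_fold_enum (E : List Int) (hnd : E.Nodup) :
    ((PySem.List.enumerate E 0).foldl (fun d (p : Int × Int) => d.insert p.2 p.1)
        (PySem.Dict.empty : PySem.Dict Int Int)).items
      = (PySem.List.enumerate E 0).map (fun p => (p.2, p.1)) := by
  have h := PySem.Dict.items_foldl_insert_fresh (l := PySem.List.enumerate E 0)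
    (k := fun p => p.2) (v := fun p => p.1) (d := (PySem.Dict.empty : PySem.Dict Int Int))
    (by intro a _; simp [PySem.Dict.contains_empty])
    (by rw [PySem.List.map_snd_enumerate]; exact hnd)
  simpa [PySem.Dict.empty] using h

-- ===== VERDICT (by name: the statement is the Claim_ definition above) =====
theorem get_indices_mapping_py_spec : Claim_equal_get_indices_mapping_py := by
  intro y_all _
  unfold Spec_get_indices_mapping_py get_indices_mapping_py get_indices_mapping_py_alt
  simp only []
  -- names
  set flatA := y_all.flatten with hflatA
  have hflat : y_all.foldl (fun flat genre_list => flat ++ genre_list) [] = flatA := by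
    simpa using foldl_extend y_all []
  have hD1 : y_all.foldl (fun indices genre_list =>
      genre_list.foldl (fun indices genre_id =>
        if genre_id ∈ indices then indices else indices ++ [genre_id]) indices) []
      = flatA.foldl aIns [] := by
    simpa [aIns] using a_dedup_eq y_all []
  rw [hD1, hflat]
  set D1 := flatA.foldl aIns [] with hD1def
  set E := PySem.List.sorted D1 (fun x => x) false with hE
  set F := PySem.List.sorted flatA (fun x => x) false with hF
  -- F is sorted
  have hFs : F.Pairwise (· ≤ ·) := by
    simpa using PySem.List.sorted_pairwise flatA (fun x => x)
  -- B's side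
  have hbnone : ∀ x ∈ F, ∀ q, (none : Option Int) = some q → q ≤ x := by
    intro x _ q hq; cases hq
  rw [scan_eq F PySem.Dict.empty 0 none hFs hbnone]
  set E2 := dedupAdj none F with hE2
  -- E2 properties
  obtain ⟨hE2lt, -⟩ := dedupAdj_lt F none hFs hbnone
  have hE2nd : E2.Nodup := List.Pairwise.imp (fun h => ne_of_lt h) hE2lt
  have hE2le : E2.Pairwise (· ≤ ·) := List.Pairwise.imp (fun h => le_of_lt h) hE2lt
  have hE2mem : ∀ x, x ∈ E2 ↔ x ∈ flatA := by
    intro x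
    rw [hE2, mem_dedupAdj F none x hFs hbnone]
    simp [hF, PySem.List.mem_sorted]
  -- E properties
  have hperm : E.Perm D1 := PySem.List.sorted_perm D1 (fun x => x) false
  have hEnd : E.Nodup := hperm.nodup_iff.mpr (nodup_foldl_aIns flatA [] (by simp))
  have hEle : E.Pairwise (· ≤ ·) := by
    simpa using PySem.List.sorted_pairwise D1 (fun x => x)
  have hEmem : ∀ x, x ∈ E ↔ x ∈ flatA := by
    intro x
    rw [hperm.mem_iff, hD1def, mem_foldl_aIns]
    simp
  -- E = E2
  have hEE2 : E = E2 := by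
    exact List.Perm.eq_of_pairwise (fun a b _ _ h1 h2 => le_antisymm h1 h2) hEle hE2le
      ((List.perm_ext_iff_of_nodup hEnd hE2nd).mpr (fun x => (hEmem x).trans (hE2mem x).symm))
  rw [items_fold_enum E hEnd, items_fold_enum E2 hE2nd, hEE2]
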